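-- pv_equiv track=rewrite | github.com/FJMLopez/Attention | Attention_process/Classes/Sentence.py | list_fusion_bpe
-- ===== SOURCE A (Python) =====
-- from typing import ClassVar, List
--
-- def list_fusion_bpe(tokens: List[str], BPE_mark: str = '@@') -> List[List[int]]:
--     """retourne la liste décroissante des tokens contenant une marque de BPE à la fin
--
--     Returns:
--         List[int]: liste décroissante des tokens contenant une marque de BPE à la fin
--     >>> Sentence.list_fusion_bpe(tokens= ["Ce@@", "ci", "est", "<pad>", "un", "te@@", "st", ".", "<eos>"])
--     [[8], [7], [6, 5], [4], [3], [2], [1, 0]]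
--     >>> Sentence.list_fusion_bpe(tokens= ["lu@@", "bu@@", "lu@@", "le", ".", "<eos>"])
--     [[5], [4], [3, 2, 1, 0]]
--     >>> Sentence.list_fusion_bpe(tokens= ["lu@@", "bu", "lu@@", "le", ".", "<eos>"])
--     [[5], [4], [3, 2], [1, 0]]
--
--
--     # >>> Sentence.list_fusion_bpe(tokens= ["Ce@@", "ci", "est", "<pad>", "un", "te@@", "st", ".", "<eos>"], BPE_mark="bpe_mark")
--     """
--     assert not tokens[-1].endswith(BPE_mark), f"Dernier token contenant une marque de BPE. Sentence: {tokens}"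
--
--     liste_bpe = []
--     flag = False # Flag permettant de savoir si on est en train de traiter un mot BPEisé
--     indice_token = 0
--     while indice_token < len(tokens):
--         # Pour chaque token de la phrase
--         if flag == False: # Si le token précédant ne contient pas de marque de BPE (représenté par le flag)
--             # On ajoute une nouvelle liste contenant l'indice du token courant (nouveau groupe)
--             liste_bpe.append([indice_token])
--         else: # On ajoute l'indice du token courant au groupe en cours
--             liste_bpe[-1].append(indice_token)
--
--         if tokens[indice_token].endswith(BPE_mark): # Si le token courant contient une marque de BPE
--             # on ajoute une liste contenant l'indice du token
--             flag = True
--         else: # Si le token courant ne contient pas de marque de BPE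
--             # On met le flag à False signifiant qu'on a fini de traiter un mot BPEisé
--             flag = False
--
--         indice_token += 1
--     return [groupe[::-1] for groupe in liste_bpe[::-1]] if len(liste_bpe) >= 1 else []
-- ===== SOURCE B (Python) =====
-- def list_fusion_bpe(tokens, BPE_mark='@@'):
--     """Build the groups directly back-to-front: walk indices from the last token
--     down to 0, accumulating the current (descending) group, and close a group
--     whenever the previous token does not carry the BPE mark.  No reversals needed."""
--     assert not tokens[-1].endswith(BPE_mark), f"Dernier token contenant une marque de BPE. Sentence: {tokens}"
--     out = []
--     group = []
--     for i in range(len(tokens) - 1, -1, -1):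
--         group.append(i)
--         if i == 0 or not tokens[i - 1].endswith(BPE_mark):
--             out.append(group)
--             group = []
--     return out
-- ===== Notes on version B (the rewrite author's own statement) =====
-- stated objective: simpler
-- what changed: B walks the indices backwards once, closing a group at each BPE-word boundary, so the descending output is built directly and A's flag/append-to-last bookkeeping and the two final reversals disappear.
import Mathlib
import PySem

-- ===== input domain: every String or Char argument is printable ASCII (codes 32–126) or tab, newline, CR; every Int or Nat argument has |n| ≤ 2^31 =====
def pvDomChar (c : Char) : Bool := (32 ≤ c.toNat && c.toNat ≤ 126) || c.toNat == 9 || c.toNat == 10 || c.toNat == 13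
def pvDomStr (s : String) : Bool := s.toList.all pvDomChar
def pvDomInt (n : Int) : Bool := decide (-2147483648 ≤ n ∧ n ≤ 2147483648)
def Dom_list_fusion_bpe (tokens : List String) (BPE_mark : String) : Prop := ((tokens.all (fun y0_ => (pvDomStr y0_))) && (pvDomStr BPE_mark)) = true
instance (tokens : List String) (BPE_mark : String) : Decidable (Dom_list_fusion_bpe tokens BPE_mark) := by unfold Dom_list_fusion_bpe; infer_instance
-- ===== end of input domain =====

-- B builds the descending groups directly by one backward walk over the indices, closing a
-- group at each BPE-word boundary, so A's flag bookkeeping and final double reversal disappear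
-- (objective: simpler; return value only — neither version mutates its arguments).

-- shared atom: tokens[i].endswith(BPE_mark) (index always in range where the ports use it)
def pvEnds (tokens : List String) (BPE_mark : String) (i : Int) : Bool :=
  PySem.Str.endswith (PySem.List.pyGetD tokens i "") BPE_mark

-- ===== PORT A =====
-- loop body of A's while-loop: state = (liste_bpe, flag); liste_bpe[-1].append(i) is
-- dropLast ++ [last ++ [i]] (last exists whenever flag is true, see proofs below)
def pvAStep (tokens : List String) (BPE_mark : String)
    (s : List (List Int) × Bool) (i : Int) : List (List Int) × Bool :=
  ((if s.2 = false then s.1 ++ [[i]] else s.1.dropLast ++ [(s.1.getLast?.getD []) ++ [i]]),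
   pvEnds tokens BPE_mark i)

def list_fusion_bpe (tokens : List String) (BPE_mark : String) : List (List Int) :=
  -- the assert is Pre_: on admitted inputs it passes
  let st := (PySem.List.pyRange 0 tokens.length 1).foldl (pvAStep tokens BPE_mark) ([], false)
  -- groupe[::-1] and liste_bpe[::-1] are reversals (PySem.List.slice?_none_none_neg_one)
  if st.1.length ≥ 1 then st.1.reverse.map (fun g => g.reverse) else []

-- ===== PORT B =====
-- loop body of B's for-loop: state = (out, group)
def pvBStep (tokens : List String) (BPE_mark : String)
    (s : List (List Int) × List Int) (i : Int) : List (List Int) × List Int :=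
  let group := s.2 ++ [i]
  if i = 0 ∨ pvEnds tokens BPE_mark (i - 1) = false then (s.1 ++ [group], []) else (s.1, group)

def list_fusion_bpe_alt (tokens : List String) (BPE_mark : String) : List (List Int) :=
  -- the assert is Pre_: on admitted inputs it passes
  ((PySem.List.pyRange ((tokens.length : Int) - 1) (-1) (-1)).foldl
      (pvBStep tokens BPE_mark) ([], [])).1

-- ===== PRECONDITION & SPEC =====
-- Pre_: exactly where Python A returns: tokens nonempty (tokens[-1] raises IndexError on [])
-- and the last token does not end with the mark (otherwise the assert raises AssertionError).
def Pre_list_fusion_bpe (tokens : List String) (BPE_mark : String) : Prop :=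
  tokens ≠ [] ∧ PySem.Str.endswith (PySem.List.pyGetD tokens (-1) "") BPE_mark = false
instance (tokens : List String) (BPE_mark : String) : Decidable (Pre_list_fusion_bpe tokens BPE_mark) := by
  unfold Pre_list_fusion_bpe; infer_instance
def pvWitness_list_fusion_bpe : List String × String := (["Ce@@", "ci", "."], "@@")

def Spec_list_fusion_bpe (tokens : List String) (BPE_mark : String) (out : List (List Int)) : Prop := out = list_fusion_bpe_alt tokens BPE_mark
instance (tokens : List String) (BPE_mark : String) (out : List (List Int)) : Decidable (Spec_list_fusion_bpe tokens BPE_mark out) := by unfold Spec_list_fusion_bpe; infer_instance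

-- ===== CLAIM (what is proved, stated in full; the proofs are below) =====
def Claim_equal_list_fusion_bpe : Prop := ∀ (tokens : List String) (BPE_mark : String), Dom_list_fusion_bpe tokens BPE_mark → Pre_list_fusion_bpe tokens BPE_mark → Spec_list_fusion_bpe tokens BPE_mark (list_fusion_bpe tokens BPE_mark)

-- ===== LEMMAS AND PROOFS =====

-- A's fold state after processing indices 0 .. n-1
def pvAst (tokens : List String) (BPE_mark : String) (n : Nat) : List (List Int) × Bool :=
  (PySem.List.pyRange 0 n 1).foldl (pvAStep tokens BPE_mark) ([], false)

-- B's fold from a pending group `cur`, over indices n-1 .. 0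
def pvBst (tokens : List String) (BPE_mark : String) (n : Nat) (cur : List Int) :
    List (List Int) × List Int :=
  (PySem.List.pyRange ((n : Int) - 1) (-1) (-1)).foldl (pvBStep tokens BPE_mark) ([], cur)

def pvHeadExt (cur : List Int) : List (List Int) → List (List Int)
  | [] => []
  | g :: r => (cur ++ g) :: r

def pvRevG (G : List (List Int)) : List (List Int) := G.reverse.map (fun g => g.reverse)

theorem pvAst_succ (t : List String) (m : String) (n : Nat) :
    pvAst t m (n + 1) = pvAStep t m (pvAst t m n) n := by
  unfold pvAst
  push_cast
  rw [PySem.List.pyRange_one_succ_right (by exact_mod_cast Nat.zero_le n), List.foldl_append]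
  rfl

theorem pvAst_flag (t : List String) (m : String) (n : Nat) :
    (pvAst t m (n + 1)).2 = pvEnds t m n := by
  rw [pvAst_succ]; rfl

theorem pvAst_ne_nil (t : List String) (m : String) (n : Nat) (h : 1 ≤ n) :
    (pvAst t m n).1 ≠ [] := by
  obtain ⟨k, rfl⟩ := Nat.exists_eq_add_of_le h
  rw [Nat.add_comm, pvAst_succ]
  unfold pvAStep
  split <;> simp

theorem pvDesc_eq (n : Nat) :
    PySem.List.pyRange ((n : Int) - 1) (-1) (-1) = (PySem.List.pyRange 0 n 1).reverse := by
  rw [PySem.List.pyRange_neg_one_eq_reverse]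
  norm_num

theorem pvBStep_pos (t : List String) (m : String) (out : List (List Int)) (cur : List Int)
    (i : Int) (hc : i = 0 ∨ pvEnds t m (i - 1) = false) :
    pvBStep t m (out, cur) i = (out ++ [cur ++ [i]], []) := by
  unfold pvBStep; rw [if_pos hc]

theorem pvBStep_neg (t : List String) (m : String) (out : List (List Int)) (cur : List Int)
    (i : Int) (hc : ¬ (i = 0 ∨ pvEnds t m (i - 1) = false)) :
    pvBStep t m (out, cur) i = (out, cur ++ [i]) := by
  unfold pvBStep; rw [if_neg hc]

-- out only grows: running B's fold from (out, cur) prefixes out to the run from ([], cur)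
theorem pvB_prefix (t : List String) (m : String) (l : List Int) :
    ∀ (out : List (List Int)) (cur : List Int),
      l.foldl (pvBStep t m) (out, cur) =
        (out ++ (l.foldl (pvBStep t m) ([], cur)).1, (l.foldl (pvBStep t m) ([], cur)).2) := by
  induction l with
  | nil => intro out cur; simp
  | cons i l ih =>
    intro out cur
    simp only [List.foldl_cons]
    by_cases hc : i = 0 ∨ pvEnds t m (i - 1) = false
    · rw [pvBStep_pos t m out cur i hc, pvBStep_pos t m [] cur i hc]
      rw [ih (out ++ [cur ++ [i]]) [], ih ([] ++ [cur ++ [i]]) []]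
      simp
    · rw [pvBStep_neg t m out cur i hc, pvBStep_neg t m [] cur i hc]
      exact ih out (cur ++ [i])

theorem pvBst_succ (t : List String) (m : String) (n : Nat) (cur : List Int) :
    pvBst t m (n + 1) cur =
      ((pvBStep t m ([], cur) n).1 ++ (pvBst t m n (pvBStep t m ([], cur) n).2).1,
       (pvBst t m n (pvBStep t m ([], cur) n).2).2) := by
  unfold pvBst
  rw [pvDesc_eq, pvDesc_eq]
  push_cast
  rw [PySem.List.pyRange_one_succ_right (by exact_mod_cast Nat.zero_le n)]
  simp only [List.reverse_append, List.reverse_singleton, List.singleton_append, List.foldl_cons]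
  rw [show pvBStep t m ([], cur) ((n : Int)) =
        ((pvBStep t m ([], cur) ((n : Int))).1, (pvBStep t m ([], cur) ((n : Int))).2) from rfl,
      pvB_prefix t m _ (pvBStep t m ([], cur) ((n : Int))).1 (pvBStep t m ([], cur) ((n : Int))).2]

theorem pvHeadExt_nil (G : List (List Int)) : pvHeadExt [] G = G := by
  cases G <;> simp [pvHeadExt]

theorem pvMain (t : List String) (m : String) :
    ∀ (n : Nat), 1 ≤ n → ∀ (cur : List Int),
      pvBst t m n cur = (pvHeadExt cur (pvRevG (pvAst t m n).1), []) := by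
  intro n
  induction n with
  | zero => intro h; omega
  | succ n ih =>
    intro _ cur
    rcases Nat.eq_zero_or_pos n with hn | hn
    · -- base case n = 1
      subst hn
      have hr1 : PySem.List.pyRange ((((0 + 1 : Nat)) : Int) - 1) (-1) (-1) = [0] := by decide
      have hr2 : PySem.List.pyRange 0 (((0 + 1 : Nat)) : Int) 1 = [0] := by decide
      unfold pvBst pvAst
      rw [hr1, hr2]
      simp [pvBStep, pvAStep, pvRevG, pvHeadExt]
    · -- step: n ≥ 1
      have hflag : (pvAst t m n).2 = pvEnds t m ((n : Int) - 1) := by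
        obtain ⟨k, rfl⟩ := Nat.exists_eq_add_of_le hn
        rw [Nat.add_comm, pvAst_flag]
        norm_num
      have hne := pvAst_ne_nil t m n hn
      rw [pvBst_succ]
      rw [pvAst_succ]
      by_cases hb : pvEnds t m ((n : Int) - 1) = false
      · -- boundary: a new word starts at n
        have hcond : pvBStep t m ([], cur) n = ([cur ++ [(n : Int)]], []) := by
          unfold pvBStep; rw [if_pos (Or.inr hb)]; rfl
        rw [hcond]
        simp only
        rw [ih hn [], pvHeadExt_nil]
        have hstep : (pvAStep t m (pvAst t m n) ((n : Int))).1 =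
            (pvAst t m n).1 ++ [[(n : Int)]] := by
          unfold pvAStep; rw [hflag, hb]; simp
        rw [hstep]
        unfold pvRevG
        simp [pvHeadExt]
      · -- continuation: token n-1 carries the mark
        have hb' : pvEnds t m ((n : Int) - 1) = true := by
          cases h : pvEnds t m ((n : Int) - 1) with
          | false => exact absurd h hb
          | true => rfl
        have hcond : pvBStep t m ([], cur) n = ([], cur ++ [(n : Int)]) := by
          unfold pvBStep
          rw [if_neg]
          rintro (h0 | h0)
          · have : (0:Int) < n := by exact_mod_cast hn
            omega
          · exact hb h0
        rw [hcond]
        simp only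
        rw [ih hn (cur ++ [(n : Int)])]
        have hstep : (pvAStep t m (pvAst t m n) ((n : Int))).1 =
            (pvAst t m n).1.dropLast ++ [((pvAst t m n).1.getLast?.getD []) ++ [(n : Int)]] := by
          unfold pvAStep; rw [hflag, hb']; simp
        rw [hstep]
        obtain ⟨ds, last, hG⟩ : ∃ ds last, (pvAst t m n).1 = ds ++ [last] :=
          ⟨(pvAst t m n).1.dropLast, (pvAst t m n).1.getLast hne,
            (List.dropLast_append_getLast hne).symm⟩
        rw [hG]
        simp [pvRevG, pvHeadExt]

theorem pvA_final (t : List String) (m : String) (h : t ≠ []) :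
    list_fusion_bpe t m = pvRevG (pvAst t m t.length).1 := by
  have h1 : 1 ≤ t.length := List.length_pos_iff.mpr h
  have hne := pvAst_ne_nil t m t.length h1
  show (if (pvAst t m t.length).1.length ≥ 1 then
      (pvAst t m t.length).1.reverse.map (fun g => g.reverse) else []) = pvRevG (pvAst t m t.length).1
  have hlen : (pvAst t m t.length).1.length ≥ 1 := List.length_pos_iff.mpr hne
  rw [if_pos hlen]
  rfl

-- ===== VERDICT (by name: the statement is the Claim_ definition above) =====
theorem list_fusion_bpe_spec : Claim_equal_list_fusion_bpe := by
  intro tokens BPE_mark _ hpre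
  unfold Spec_list_fusion_bpe
  have h1 : 1 ≤ tokens.length := List.length_pos_iff.mpr hpre.1
  have hB : list_fusion_bpe_alt tokens BPE_mark = (pvBst tokens BPE_mark tokens.length []).1 := rfl
  rw [hB, pvMain tokens BPE_mark tokens.length h1 [], pvA_final tokens BPE_mark hpre.1,
      pvHeadExt_nil]
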